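-- pv_equiv track=rewrite | github.com/penquinspecz/SignalCraft | scripts/ops/collect_dr_receipt_bundle.py | _has_ok_alarm_ok_sequence
-- ===== SOURCE A (Python) =====
-- from typing import Any
--
-- def _has_ok_alarm_ok_sequence(transitions: list[dict[str, Any]]) -> bool:
--     saw_ok_to_alarm = False
--     for transition in transitions:
--         from_state = transition.get("from")
--         to_state = transition.get("to")
--         if from_state == "OK" and to_state == "ALARM":
--             saw_ok_to_alarm = True
--         elif saw_ok_to_alarm and from_state == "ALARM" and to_state == "OK":
--             return True
--     return False
-- ===== SOURCE B (Python) =====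
-- def _has_ok_alarm_ok_sequence(transitions):
--     pivot = None
--     for i, transition in enumerate(transitions):
--         if transition.get("from") == "OK" and transition.get("to") == "ALARM":
--             pivot = i
--             break
--     if pivot is None:
--         return False
--     return any(
--         u.get("from") == "ALARM" and u.get("to") == "OK"
--         for u in transitions[pivot + 1:]
--     )
-- ===== Notes on version B (the rewrite author's own statement) =====
-- stated objective: alternative
-- what changed: Replaced the single flag-carrying scan by two phases: find the index of the first OK->ALARM transition, then search only the suffix strictly after it for an ALARM->OK transition.
import Mathlib
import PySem

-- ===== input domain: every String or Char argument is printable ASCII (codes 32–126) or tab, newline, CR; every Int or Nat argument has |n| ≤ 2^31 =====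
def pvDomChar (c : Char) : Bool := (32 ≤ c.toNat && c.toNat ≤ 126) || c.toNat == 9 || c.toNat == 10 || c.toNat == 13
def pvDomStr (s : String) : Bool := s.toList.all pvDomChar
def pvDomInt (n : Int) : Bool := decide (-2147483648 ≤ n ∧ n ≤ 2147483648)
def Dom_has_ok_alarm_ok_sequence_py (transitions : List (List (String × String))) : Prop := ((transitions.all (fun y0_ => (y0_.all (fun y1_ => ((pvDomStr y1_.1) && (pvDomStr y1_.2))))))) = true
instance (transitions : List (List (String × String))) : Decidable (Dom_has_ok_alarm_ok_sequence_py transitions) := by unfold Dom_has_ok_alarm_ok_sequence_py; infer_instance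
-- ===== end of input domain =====

-- B replaces A's flag-carrying single scan by two phases (find first OK->ALARM pivot, then scan the strict suffix for ALARM->OK); alternative decomposition, same cost.


-- ===== PORT A =====
-- dict.get("k") on the association list = first match (Python dicts have unique keys)
def pvGet (t : List (String × String)) (k : String) : Option String :=
  List.lookup k t

-- the 'for transition in transitions' loop of A, carrying the saw_ok_to_alarm flag
def pvLoopA : List (List (String × String)) → Bool → Bool
  | [], _ => false
  | t :: rest, saw =>
    let fromState := pvGet t "from"
    let toState := pvGet t "to"
    if fromState = some "OK" ∧ toState = some "ALARM" then
      pvLoopA rest true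
    else if saw = true ∧ fromState = some "ALARM" ∧ toState = some "OK" then
      true
    else
      pvLoopA rest saw

def has_ok_alarm_ok_sequence_py (transitions : List (List (String × String))) : Bool :=
  pvLoopA transitions false

-- ===== PORT B =====
-- phase 1 of B: the enumerate loop with break, returning the index of the first OK->ALARM transition
def pvFindPivot : List (List (String × String)) → Nat → Option Nat
  | [], _ => none
  | t :: rest, i =>
    if pvGet t "from" = some "OK" ∧ pvGet t "to" = some "ALARM" then some i
    else pvFindPivot rest (i + 1)

def has_ok_alarm_ok_sequence_py_alt (transitions : List (List (String × String))) : Bool :=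
  match pvFindPivot transitions 0 with
  | none => false
  | some pivot =>
      (PySem.List.slice transitions (some ((pivot : Int) + 1)) none).any
        (fun u => decide (pvGet u "from" = some "ALARM" ∧ pvGet u "to" = some "OK"))

-- ===== PRECONDITION & SPEC =====
def Spec_has_ok_alarm_ok_sequence_py (transitions : List (List (String × String))) (out : Bool) : Prop := out = has_ok_alarm_ok_sequence_py_alt transitions
instance (transitions : List (List (String × String))) (out : Bool) : Decidable (Spec_has_ok_alarm_ok_sequence_py transitions out) := by unfold Spec_has_ok_alarm_ok_sequence_py; infer_instance

-- ===== CLAIM (what is proved, stated in full; the proofs are below) =====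
def Claim_equal_has_ok_alarm_ok_sequence_py : Prop := ∀ (transitions : List (List (String × String))), Dom_has_ok_alarm_ok_sequence_py transitions → Spec_has_ok_alarm_ok_sequence_py transitions (has_ok_alarm_ok_sequence_py transitions)

-- ===== LEMMAS AND PROOFS =====

-- the ALARM->OK test used by B's phase 2
def pvIsBack (t : List (String × String)) : Bool :=
  decide (pvGet t "from" = some "ALARM" ∧ pvGet t "to" = some "OK")

-- a transition cannot be both OK->ALARM and ALARM->OK
lemma pvPiv_not_back (t : List (String × String))
    (h : pvGet t "from" = some "OK" ∧ pvGet t "to" = some "ALARM") : pvIsBack t = false := by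
  simp [pvIsBack]
  intro h1
  rw [h.1] at h1
  simp at h1

-- once the flag is set, A's remaining loop is exactly 'any ALARM->OK'
lemma pvLoopA_true (ts : List (List (String × String))) : pvLoopA ts true = ts.any pvIsBack := by
  induction ts with
  | nil => rfl
  | cons t rest ih =>
    by_cases hp : pvGet t "from" = some "OK" ∧ pvGet t "to" = some "ALARM"
    · simp [pvLoopA, hp, ih, pvPiv_not_back t hp]
    · by_cases hb : pvGet t "from" = some "ALARM" ∧ pvGet t "to" = some "OK"
      · simp [pvLoopA, hb, pvIsBack]
      · simp [pvLoopA, hp, hb, ih, pvIsBack]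

-- B with the slice unfolded to List.drop
lemma pvAlt_norm (ts : List (List (String × String))) :
    has_ok_alarm_ok_sequence_py_alt ts =
      match pvFindPivot ts 0 with
      | none => false
      | some pivot => (ts.drop (pivot + 1)).any pvIsBack := by
  unfold has_ok_alarm_ok_sequence_py_alt
  cases h : pvFindPivot ts 0 with
  | none => rfl
  | some pivot =>
    have hc : ((pivot : Int) + 1) = ((pivot + 1 : Nat) : Int) := by push_cast; ring
    simp only [hc, PySem.List.slice_from_natCast]
    rfl

-- pvFindPivot shifts uniformly with its starting index
lemma pvFindPivot_shift (ts : List (List (String × String))) (i : Nat) :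
    pvFindPivot ts i = (pvFindPivot ts 0).map (· + i) := by
  induction ts generalizing i with
  | nil => rfl
  | cons t rest ih =>
    by_cases hp : pvGet t "from" = some "OK" ∧ pvGet t "to" = some "ALARM"
    · simp [pvFindPivot, hp]
    · simp only [pvFindPivot, if_neg hp, ih (i + 1), ih 1, Option.map_map]
      cases pvFindPivot rest 0
      · simp
      · simp; omega

lemma pvMain (ts : List (List (String × String))) :
    pvLoopA ts false = has_ok_alarm_ok_sequence_py_alt ts := by
  induction ts with
  | nil => rfl
  | cons t rest ih =>
    rw [pvAlt_norm]
    by_cases hp : pvGet t "from" = some "OK" ∧ pvGet t "to" = some "ALARM"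
    · simp only [pvLoopA, if_pos hp, pvFindPivot, List.drop_succ_cons, List.drop_zero]
      exact pvLoopA_true rest
    · have : pvLoopA (t :: rest) false = pvLoopA rest false := by
        simp [pvLoopA, hp]
      rw [this, ih, pvAlt_norm]
      simp only [pvFindPivot, if_neg hp, pvFindPivot_shift rest 1]
      cases pvFindPivot rest 0 with
      | none => rfl
      | some j => simp

-- ===== VERDICT (by name: the statement is the Claim_ definition above) =====
theorem has_ok_alarm_ok_sequence_py_spec : Claim_equal_has_ok_alarm_ok_sequence_py := by
  intro ts _
  exact pvMain ts
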